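-- pv_equiv track=rewrite | github.com/Lackoftactics/HRM | evaluate_factorization.py | parse_factorization
-- ===== SOURCE A (Python) =====
-- from typing import List, Tuple, Dict, Optional
--
-- def parse_factorization(tokens: List[int]) -> List[Tuple[int, int]]:
--     """Parse factorization tokens into (factor, power) pairs."""
--     factors = []
--     i = 0
--
--     while i < len(tokens):
--         if tokens[i] == 13:  # END token
--             break
--         if tokens[i] == 14:  # PAD token
--             break
--         if tokens[i] == 12:  # x (multiplication)
--             i += 1
--             continue
--
--         # Parse factor
--         factor_digits = []
--         while i < len(tokens) and 0 <= tokens[i] <= 9: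
--             factor_digits.append(tokens[i])
--             i += 1
--
--         if not factor_digits:
--             break
--
--         factor = int(''.join(map(str, factor_digits)))
--         power = 1
--
--         # Check for power
--         if i < len(tokens) and tokens[i] == 11:  # ^ token
--             i += 1
--             power_digits = []
--             while i < len(tokens) and 0 <= tokens[i] <= 9:
--                 power_digits.append(tokens[i])
--                 i += 1
--             if power_digits:
--                 power = int(''.join(map(str, power_digits)))
--
--         factors.append((factor, power))
--
--     return factors
-- ===== SOURCE B (Python) =====
-- from typing import List, Tuple
--
--
-- def parse_factorization(tokens: List[int]) -> List[Tuple[int, int]]: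
--     """Parse factorization tokens into (factor, power) pairs.
--
--     Two passes: first tokenize into symbols (numbers, '^', 'x', stop markers),
--     then read (factor, power) pairs off the symbol list."""
--     # Pass 1: group maximal digit runs into numbers; 13/14 end tokenization.
--     syms = []
--     i, n = 0, len(tokens)
--     while i < n:
--         t = tokens[i]
--         if 0 <= t <= 9:
--             run = []
--             while i < n and 0 <= tokens[i] <= 9:
--                 run.append(tokens[i])
--                 i += 1
--             syms.append(('n', int(''.join(map(str, run)))))
--         elif t == 11:
--             syms.append(('^',))
--             i += 1
--         elif t == 12:
--             syms.append(('x',))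
--             i += 1
--         elif t == 13 or t == 14:
--             break
--         else:
--             syms.append(('!',))
--             i += 1
--     # Pass 2: factors are numbers, optionally followed by '^' and a number.
--     out = []
--     j, m = 0, len(syms)
--     while j < m:
--         s = syms[j]
--         if s == ('x',):
--             j += 1
--             continue
--         if s[0] != 'n':
--             break
--         factor, power = s[1], 1
--         j += 1
--         if j < m and syms[j] == ('^',):
--             j += 1
--             if j < m and syms[j][0] == 'n':
--                 power = syms[j][1]
--                 j += 1
--         out.append((factor, power))
--     return out
-- ===== Notes on version B (the rewrite author's own statement) =====
-- stated objective: alternative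
-- what changed: Replaces A's single index-driven while loop (with nested digit-collection loops interleaved with parsing decisions) by a two-phase design: a tokenizer that groups maximal digit runs into number symbols and maps 11/12/other to operator/stop markers (halting at 13/14), followed by a separate parser that reads (factor, power) pairs off the symbol list.
import Mathlib
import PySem

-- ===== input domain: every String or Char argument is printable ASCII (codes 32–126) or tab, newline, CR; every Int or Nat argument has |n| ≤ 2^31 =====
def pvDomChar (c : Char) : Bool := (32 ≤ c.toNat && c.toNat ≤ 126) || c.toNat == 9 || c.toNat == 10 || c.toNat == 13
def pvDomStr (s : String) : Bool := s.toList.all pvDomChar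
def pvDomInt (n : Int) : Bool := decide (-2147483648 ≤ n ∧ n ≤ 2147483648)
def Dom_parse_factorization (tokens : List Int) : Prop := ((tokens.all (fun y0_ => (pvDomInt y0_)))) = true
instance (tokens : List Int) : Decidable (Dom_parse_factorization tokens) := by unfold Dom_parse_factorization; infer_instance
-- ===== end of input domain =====

-- B replaces A's single index-driven parse loop by a two-phase tokenizer + parser over a symbol list (alternative decomposition, same cost).


-- ===== PORT A =====
-- Shared helper: Python's inner `while i < len(tokens) and 0 <= tokens[i] <= 9: digits.append(tokens[i]); i += 1`
-- (both A and B contain this digit-collecting loop verbatim): returns (collected digits, remaining tokens).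
def pvDigitsRun : List Int → List Int × List Int
  | [] => ([], [])
  | t :: ts =>
    if 0 ≤ t ∧ t ≤ 9 then
      let r := pvDigitsRun ts
      (t :: r.1, r.2)
    else ([], t :: ts)

-- Shared helper: Python's `int(''.join(map(str, digits)))` (both A and B contain this expression verbatim).
-- `.getD 0` is unreachable on the digit lists both programs feed it (int() never raises on them).
def pvIntOfDigits (ds : List Int) : Int :=
  (PySem.Int.ofStr? (PySem.Str.join "" (ds.map PySem.Int.toStr))).getD 0

-- termination lemmas for the loops below (cited by the ports)
theorem pvDigitsRun_snd_len_le (xs : List Int) : (pvDigitsRun xs).2.length ≤ xs.length := by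
  induction xs with
  | nil => simp [pvDigitsRun]
  | cons t ts ih =>
    by_cases h : 0 ≤ t ∧ t ≤ 9 <;> simp [pvDigitsRun, h] <;> omega

theorem pvDigitsRun_snd_len_lt (t : Int) (ts : List Int)
    (h : (pvDigitsRun (t :: ts)).1 ≠ []) : (pvDigitsRun (t :: ts)).2.length ≤ ts.length := by
  by_cases hd : 0 ≤ t ∧ t ≤ 9
  · simpa [pvDigitsRun, hd] using pvDigitsRun_snd_len_le ts
  · simp [pvDigitsRun, hd] at h

-- Python A's `while i < len(tokens)` loop, on the suffix of tokens from i (i only moves forward).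
def pvLoopA : List Int → List (Int × Int) → List (Int × Int)
  | [], factors => factors
  | t :: ts, factors =>
    if t = 13 then factors
    else if t = 14 then factors
    else if t = 12 then pvLoopA ts factors
    else
      let fr := pvDigitsRun (t :: ts)
      if hne : fr.1 = [] then factors
      else
        let factor := pvIntOfDigits fr.1
        -- `if i < len(tokens) and tokens[i] == 11:` = the remaining list starts with 11
        if fr.2.head? = some 11 then
          let pr := pvDigitsRun fr.2.tail
          let power := if pr.1 = [] then 1 else pvIntOfDigits pr.1
          pvLoopA pr.2 (factors ++ [(factor, power)])
        else
          pvLoopA fr.2 (factors ++ [(factor, 1)])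
  termination_by xs _ => xs.length
  decreasing_by
  · simp
  · have h1 := pvDigitsRun_snd_len_lt t ts hne
    have h2 := pvDigitsRun_snd_len_le (pvDigitsRun (t :: ts)).2.tail
    have h3 : (pvDigitsRun (t :: ts)).2.tail.length ≤ (pvDigitsRun (t :: ts)).2.length := by
      rw [List.length_tail]; omega
    simp only [List.length_cons]; omega
  · have h1 := pvDigitsRun_snd_len_lt t ts hne
    simp only [List.length_cons]; omega

def parse_factorization (tokens : List Int) : List (Int × Int) :=
  pvLoopA tokens []

-- ===== PORT B =====
-- B's symbols: ('n', v) | ('^',) | ('x',) | ('!',)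
inductive PvSym where
  | num : Int → PvSym
  | caret : PvSym
  | times : PvSym
  | stop : PvSym
deriving DecidableEq, Repr

-- B's pass 1: tokenize (halting at 13/14).
def pvTok : List Int → List PvSym
  | [] => []
  | t :: ts =>
    if h : 0 ≤ t ∧ t ≤ 9 then
      let r := pvDigitsRun (t :: ts)
      PvSym.num (pvIntOfDigits r.1) :: pvTok r.2
    else if t = 11 then PvSym.caret :: pvTok ts
    else if t = 12 then PvSym.times :: pvTok ts
    else if t = 13 ∨ t = 14 then []
    else PvSym.stop :: pvTok ts
  termination_by xs => xs.length
  decreasing_by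
  · have h1 : (pvDigitsRun (t :: ts)).1 ≠ [] := by simp [pvDigitsRun, h]
    have := pvDigitsRun_snd_len_lt t ts h1
    simp only [List.length_cons]; omega
  all_goals simp

-- B's pass 2: read (factor, power) pairs off the symbol list (index j with lookahead ⇒ list patterns).
def pvParse : List PvSym → List (Int × Int) → List (Int × Int)
  | [], out => out
  | PvSym.times :: ss, out => pvParse ss out
  | PvSym.caret :: _, out => out
  | PvSym.stop :: _, out => out
  | PvSym.num v :: PvSym.caret :: PvSym.num p :: ss, out => pvParse ss (out ++ [(v, p)])
  | PvSym.num v :: PvSym.caret :: ss, out => pvParse ss (out ++ [(v, 1)])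
  | PvSym.num v :: ss, out => pvParse ss (out ++ [(v, 1)])

def parse_factorization_alt (tokens : List Int) : List (Int × Int) :=
  pvParse (pvTok tokens) []

-- ===== PRECONDITION & SPEC =====
def Spec_parse_factorization (tokens : List Int) (out : List (Int × Int)) : Prop := out = parse_factorization_alt tokens
instance (tokens : List Int) (out : List (Int × Int)) : Decidable (Spec_parse_factorization tokens out) := by unfold Spec_parse_factorization; infer_instance

-- ===== CLAIM (what is proved, stated in full; the proofs are below) =====
def Claim_equal_parse_factorization : Prop := ∀ (tokens : List Int), Dom_parse_factorization tokens → Spec_parse_factorization tokens (parse_factorization tokens)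

-- ===== LEMMAS AND PROOFS =====

-- maximality of a digit run: the remainder never starts with a digit
theorem pvDigitsRun_snd_head (xs : List Int) (w : Int) (ws : List Int)
    (h : (pvDigitsRun xs).2 = w :: ws) : ¬ (0 ≤ w ∧ w ≤ 9) := by
  induction xs with
  | nil => simp [pvDigitsRun] at h
  | cons t ts ih =>
    by_cases hd : 0 ≤ t ∧ t ≤ 9
    · exact ih (by simpa [pvDigitsRun, hd] using h)
    · simp [pvDigitsRun, hd] at h
      intro hc; exact hd (h.1 ▸ hc)

theorem pvDigitsRun_cons_digit (t : Int) (ts : List Int) (h : 0 ≤ t ∧ t ≤ 9) :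
    pvDigitsRun (t :: ts) = (t :: (pvDigitsRun ts).1, (pvDigitsRun ts).2) := by
  simp [pvDigitsRun, h]

theorem pvMain (n : Nat) : ∀ (xs : List Int), xs.length ≤ n →
    ∀ (acc : List (Int × Int)), pvParse (pvTok xs) acc = pvLoopA xs acc := by
  induction n with
  | zero =>
    intro xs hlen acc
    have hx : xs = [] := List.length_eq_zero_iff.mp (Nat.le_zero.mp hlen)
    subst hx; simp [pvTok, pvParse, pvLoopA]
  | succ n ih =>
    intro xs hlen acc
    match xs with
    | [] => simp [pvTok, pvParse, pvLoopA]
    | t :: ts =>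
      simp only [List.length_cons, Nat.succ_le_succ_iff] at hlen
      by_cases hd : 0 ≤ t ∧ t ≤ 9
      · have h13 : t ≠ 13 := by omega
        have h14 : t ≠ 14 := by omega
        have h12 : t ≠ 12 := by omega
        have hne : (pvDigitsRun (t :: ts)).1 ≠ [] := by
          rw [pvDigitsRun_cons_digit t ts hd]; simp
        have hlen2 : (pvDigitsRun (t :: ts)).2.length ≤ ts.length := pvDigitsRun_snd_len_lt t ts hne
        rw [pvTok]
        simp only [dif_pos hd, pvLoopA, if_neg h13, if_neg h14, if_neg h12, dif_neg hne]
        rcases hrest : (pvDigitsRun (t :: ts)).2 with _ | ⟨w, ws⟩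
        · simp [pvTok, pvParse, pvLoopA]
        · have hw : ¬ (0 ≤ w ∧ w ≤ 9) := pvDigitsRun_snd_head _ _ _ hrest
          by_cases h11 : w = 11
          · subst h11
            simp only [List.head?_cons, Option.some.injEq, if_pos rfl, List.tail_cons]
            rw [pvTok]
            simp only [dif_neg hw, if_pos rfl]
            rcases hws : ws with _ | ⟨u, us⟩
            · simp [pvTok, pvParse, pvDigitsRun, pvLoopA]
            · by_cases hu : 0 ≤ u ∧ u ≤ 9
              · have hpne : (pvDigitsRun (u :: us)).1 ≠ [] := by
                  rw [pvDigitsRun_cons_digit u us hu]; simp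
                have hplen : (pvDigitsRun (u :: us)).2.length ≤ us.length :=
                  pvDigitsRun_snd_len_lt u us hpne
                rw [pvTok]
                simp only [dif_pos hu, pvParse, if_neg hpne]
                apply ih
                have := hrest ▸ hlen2
                simp only [hws, List.length_cons] at this ⊢
                omega
              · have hp0 : pvDigitsRun (u :: us) = ([], u :: us) := by
                  simp [pvDigitsRun, hu]
                rw [hp0]
                simp only [if_pos rfl]
                by_cases hu11 : u = 11
                · subst hu11
                  simp only [pvTok, dif_neg hu, reduceIte, pvParse]
                  rw [pvLoopA]
                  simp [pvDigitsRun]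
                · by_cases hu12 : u = 12
                  · subst hu12
                    rw [pvTok]
                    simp only [dif_neg hu, if_neg (by omega : ¬ (12:Int) = 11), if_pos rfl, pvParse]
                    rw [pvLoopA]
                    simp only [if_neg (by omega : ¬ (12:Int) = 13), if_neg (by omega : ¬ (12:Int) = 14), if_pos rfl]
                    apply ih
                    have := hrest ▸ hlen2; simp only [hws, List.length_cons] at this; omega
                  · by_cases hu1314 : u = 13 ∨ u = 14
                    · rw [pvTok]
                      rcases hu1314 with h | h <;> subst h <;>
                        simp [pvParse, pvLoopA, hu]
                    · rw [pvTok]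
                      simp only [dif_neg hu, if_neg hu11, if_neg hu12, if_neg hu1314, pvParse]
                      rw [pvLoopA]
                      simp [pvParse, pvDigitsRun, hu, (by tauto : ¬ u = 13), (by tauto : ¬ u = 14),
                        (by tauto : ¬ u = 12)]
          · have hne11 : ¬ ((w :: ws).head? = some 11) := by simp [h11]
            rw [if_neg hne11]
            by_cases h12w : w = 12
            · subst h12w
              rw [pvTok]
              simp only [dif_neg hw, if_neg (by omega : ¬ (12:Int) = 11), if_pos rfl, pvParse]
              rw [pvLoopA]
              simp only [if_neg (by omega : ¬ (12:Int) = 13), if_neg (by omega : ¬ (12:Int) = 14), if_pos rfl]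
              apply ih
              have := hrest ▸ hlen2; simp only [List.length_cons] at this; omega
            · by_cases h1314 : w = 13 ∨ w = 14
              · rw [pvTok]
                simp only [dif_neg hw, if_neg h11, if_neg h12w, if_pos h1314, pvParse]
                rcases h1314 with h | h <;> subst h <;> simp [pvLoopA]
              · rw [pvTok]
                simp only [dif_neg hw, if_neg h11, if_neg h12w, if_neg h1314, pvParse]
                rw [pvLoopA]
                simp only [if_neg (by tauto : ¬ w = 13), if_neg (by tauto : ¬ w = 14),
                  if_neg (by tauto : ¬ w = 12), dif_pos (by simp [pvDigitsRun, hw] : (pvDigitsRun (w :: ws)).1 = [])]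
      · by_cases h13 : t = 13
        · subst h13; simp [pvTok, pvParse, pvLoopA]
        · by_cases h14 : t = 14
          · subst h14; simp [pvTok, pvParse, pvLoopA]
          · by_cases h12 : t = 12
            · subst h12
              rw [pvTok]
              simp only [dif_neg hd, if_neg (by omega : ¬ (12:Int) = 11), if_pos rfl, pvParse]
              rw [pvLoopA]
              simp only [if_neg (by omega : ¬ (12:Int) = 13), if_neg (by omega : ¬ (12:Int) = 14), if_pos rfl]
              exact ih ts hlen acc
            · by_cases h11 : t = 11
              · subst h11
                simp only [pvTok, dif_neg hd, reduceIte, pvParse]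
                rw [pvLoopA]
                simp [pvDigitsRun]
              · rw [pvTok]
                simp only [dif_neg hd, if_neg h11, if_neg h12, if_neg (by tauto : ¬ (t = 13 ∨ t = 14)), pvParse]
                rw [pvLoopA]
                simp only [if_neg h13, if_neg h14, if_neg h12,
                  dif_pos (by simp [pvDigitsRun, hd] : (pvDigitsRun (t :: ts)).1 = [])]

-- ===== VERDICT (by name: the statement is the Claim_ definition above) =====
theorem parse_factorization_spec : Claim_equal_parse_factorization := by
  intro tokens _
  unfold Spec_parse_factorization parse_factorization parse_factorization_alt
  exact (pvMain tokens.length tokens le_rfl []).symm
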